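-- pv_equiv track=rewrite | github.com/dhkimxx/openrouter-free-model-scouter | src/openrouter_free_model_scouter/cli.py | _merge_env_with_dotenv
-- ===== SOURCE A (Python) =====
-- from typing import Any, Dict
--
-- def _merge_env_with_dotenv(
--     dotenv_mapping: Dict[str, str], runtime_env: Dict[str, str]
-- ) -> Dict[str, str]:
--     merged: Dict[str, str] = dict(dotenv_mapping)
--     for key, value in runtime_env.items():
--         # Empty process env values should not shadow non-empty .env values.
--         if value != "":
--             merged[key] = value
--         elif key not in merged:
--             merged[key] = value
--     return merged
-- ===== SOURCE B (Python) =====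
-- from typing import Any, Dict
--
--
-- def _pick(runtime_value: str, dotenv_value: str) -> str:
--     return runtime_value if runtime_value != "" else dotenv_value
--
--
-- def _merge_env_with_dotenv(
--     dotenv_mapping: Dict[str, str], runtime_env: Dict[str, str]
-- ) -> Dict[str, str]:
--     # Decide each dotenv key's value once; then append the runtime-only keys.
--     overlaid = {
--         k: _pick(runtime_env.get(k, ""), v) for k, v in dotenv_mapping.items()
--     }
--     fresh = {k: v for k, v in runtime_env.items() if k not in dotenv_mapping}
--     return {**overlaid, **fresh}
-- ===== Notes on version B (the rewrite author's own statement) =====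
-- stated objective: alternative
-- what changed: Replaces A's copy-then-mutate overlay loop (copy dotenv, then conditionally overwrite/insert per runtime item) by a per-key decision: one comprehension choosing each dotenv key's value via a non-empty runtime lookup, plus one comprehension of runtime-only keys, merged once.
import Mathlib
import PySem

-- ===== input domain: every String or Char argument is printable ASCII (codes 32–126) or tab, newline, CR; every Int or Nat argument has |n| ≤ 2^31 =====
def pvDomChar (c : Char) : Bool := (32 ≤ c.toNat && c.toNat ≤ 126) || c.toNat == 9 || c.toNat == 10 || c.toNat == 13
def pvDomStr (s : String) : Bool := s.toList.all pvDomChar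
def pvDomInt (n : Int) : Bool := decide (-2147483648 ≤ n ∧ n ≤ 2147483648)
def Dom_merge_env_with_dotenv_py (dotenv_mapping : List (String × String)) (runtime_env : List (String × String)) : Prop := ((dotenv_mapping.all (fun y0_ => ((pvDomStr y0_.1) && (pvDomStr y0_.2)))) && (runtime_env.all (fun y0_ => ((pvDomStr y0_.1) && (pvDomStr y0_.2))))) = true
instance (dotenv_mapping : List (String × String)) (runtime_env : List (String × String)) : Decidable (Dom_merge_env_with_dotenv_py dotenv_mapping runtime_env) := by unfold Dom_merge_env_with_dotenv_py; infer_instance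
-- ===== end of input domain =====

-- B replaces A's copy-then-mutate overlay loop with a per-key decision (one map over the
-- dotenv items plus the runtime-only items appended); objective: alternative decomposition.

-- ===== PORT A =====
-- merged = dict(dotenv_mapping); for key, value in runtime_env.items(): …
def merge_env_with_dotenv_py (dotenv_mapping : List (String × String)) (runtime_env : List (String × String)) : List (String × String) :=
  let merged := PySem.Dict.ofList dotenv_mapping
  ((PySem.Dict.ofList runtime_env).items.foldl
    (fun m p =>
      if p.2 ≠ "" then m.insert p.1 p.2
      else if m.contains p.1 then m
      else m.insert p.1 p.2)
    merged).items

-- ===== PORT B =====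
-- _pick(runtime_value, dotenv_value)
def pvPick (runtime_value : String) (dotenv_value : String) : String :=
  if runtime_value ≠ "" then runtime_value else dotenv_value

-- overlaid-comprehension ++ fresh-comprehension ({**overlaid, **fresh}: the key sets are
-- disjoint by construction, so the merged dict's items are the concatenation).
def merge_env_with_dotenv_py_alt (dotenv_mapping : List (String × String)) (runtime_env : List (String × String)) : List (String × String) :=
  let d := PySem.Dict.ofList dotenv_mapping
  let r := PySem.Dict.ofList runtime_env
  let overlaid := d.items.map (fun p => (p.1, pvPick (r.getD p.1 "") p.2))
  let fresh := r.items.filter (fun p => !(d.contains p.1))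
  overlaid ++ fresh

-- ===== PRECONDITION & SPEC =====
def Spec_merge_env_with_dotenv_py (dotenv_mapping : List (String × String)) (runtime_env : List (String × String)) (out : List (String × String)) : Prop := out = merge_env_with_dotenv_py_alt dotenv_mapping runtime_env
instance (dotenv_mapping : List (String × String)) (runtime_env : List (String × String)) (out : List (String × String)) : Decidable (Spec_merge_env_with_dotenv_py dotenv_mapping runtime_env out) := by unfold Spec_merge_env_with_dotenv_py; infer_instance

-- ===== CLAIM (what is proved, stated in full; the proofs are below) =====
def Claim_equal_merge_env_with_dotenv_py : Prop := ∀ (dotenv_mapping : List (String × String)) (runtime_env : List (String × String)), Dom_merge_env_with_dotenv_py dotenv_mapping runtime_env → Spec_merge_env_with_dotenv_py dotenv_mapping runtime_env (merge_env_with_dotenv_py dotenv_mapping runtime_env)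

-- ===== LEMMAS AND PROOFS =====

lemma pv_getD_mk_cons (k x v : String) (t : List (String × String)) :
    (PySem.Dict.mk ((k, v) :: t)).getD x "" =
      if k == x then v else (PySem.Dict.mk t).getD x "" := by
  rw [PySem.Dict.getD_eq_get?_getD, PySem.Dict.get?_mk_cons]
  split <;> simp [PySem.Dict.getD_eq_get?_getD]

lemma pv_getD_mk_of_not_mem (x : String) (t : List (String × String))
    (hx : x ∉ t.map Prod.fst) : (PySem.Dict.mk t).getD x "" = "" := by
  rw [PySem.Dict.getD_eq_get?_getD]
  have : (PySem.Dict.mk t).get? x = none := by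
    rw [PySem.Dict.get?_eq_none_iff_not_mem_keys]
    simpa [PySem.Dict.keys_mk] using hx
  simp [this]

-- Main invariant: running A's overlay loop over a unique-key item list l starting from any
-- dict m yields exactly B's shape: each m-item's value decided by pvPick against l's lookup,
-- followed by the l-items whose key is fresh in m.
lemma pv_foldl_merge_items (l : List (String × String)) (m : PySem.Dict String String)
    (hl : (l.map Prod.fst).Nodup) :
    (l.foldl
      (fun m p =>
        if p.2 ≠ "" then m.insert p.1 p.2
        else if m.contains p.1 then m
        else m.insert p.1 p.2) m).items
    = m.items.map (fun p => (p.1, pvPick ((PySem.Dict.mk l).getD p.1 "") p.2))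
      ++ l.filter (fun p => !(m.contains p.1)) := by
  induction l generalizing m with
  | nil =>
      simp [PySem.Dict.getD_eq_get?_getD, PySem.Dict.get?, pvPick]
  | cons hd t ih =>
      obtain ⟨k, v⟩ := hd
      simp only [List.map_cons, List.nodup_cons] at hl
      obtain ⟨hk, ht⟩ := hl
      simp only [List.foldl_cons]
      by_cases hc : m.contains k = true
      · by_cases hv : v = ""
        · -- key present, empty runtime value: the loop skips
          have hstep : (if v ≠ "" then m.insert k v
              else if m.contains k then m else m.insert k v) = m := by
            simp [hv, hc]
          rw [hstep, ih _ ht]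
          congr 1
          · apply List.map_congr_left
            intro p _
            rw [pv_getD_mk_cons]
            by_cases hpk : (k == p.1) = true
            · have hp1 : p.1 = k := (beq_iff_eq.mp hpk).symm
              rw [if_pos hpk, hp1, pv_getD_mk_of_not_mem k t hk]
              simp [pvPick, hv]
            · rw [if_neg hpk]
          · rw [List.filter_cons]
            simp [hc]
        · -- key present, non-empty value: update in place
          have hstep : (if v ≠ "" then m.insert k v
              else if m.contains k then m else m.insert k v) = m.insert k v := by
            simp [hv]
          rw [hstep, ih _ ht, PySem.Dict.items_insert_of_contains m v hc, List.map_map]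
          congr 1
          · apply List.map_congr_left
            intro p _
            show (fun p => (p.1, pvPick ((PySem.Dict.mk t).getD p.1 "") p.2))
                  (if (p.1 == k) = true then (k, v) else p)
                = (p.1, pvPick ((PySem.Dict.mk ((k, v) :: t)).getD p.1 "") p.2)
            rw [pv_getD_mk_cons]
            by_cases hpk : (p.1 == k) = true
            · have hp1 : p.1 = k := beq_iff_eq.mp hpk
              have hkp : (k == p.1) = true := by simp [hp1]
              rw [if_pos hpk, if_pos hkp]
              simp [pv_getD_mk_of_not_mem k t hk, pvPick, hv, hp1]
            · have hkp : (k == p.1) = false := by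
                rcases beq_eq_false_iff_ne.mp (Bool.eq_false_iff.mpr hpk) with hne
                exact beq_eq_false_iff_ne.mpr (fun h => hne h.symm)
              rw [if_neg hpk, if_neg (by simp [hkp])]
          · rw [List.filter_cons, if_neg (by simp [hc])]
            apply List.filter_congr
            intro p hp
            by_cases hpk : (p.1 == k) = true
            · have hp1 : p.1 = k := beq_iff_eq.mp hpk
              simp [hp1, hc]
            · simp [PySem.Dict.contains_insert, hpk]
      · -- fresh key: appended, value kept verbatim
        have hc' : m.contains k = false := by simpa using hc
        have hstep : (if v ≠ "" then m.insert k v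
            else if m.contains k then m else m.insert k v) = m.insert k v := by
          by_cases hv : v = "" <;> simp [hv, hc']
        rw [hstep, ih _ ht, PySem.Dict.items_insert_of_not_contains m v hc', List.map_append]
        have hmap : m.items.map (fun p => (p.1, pvPick ((PySem.Dict.mk t).getD p.1 "") p.2))
            = m.items.map (fun p => (p.1, pvPick ((PySem.Dict.mk ((k, v) :: t)).getD p.1 "") p.2)) := by
          apply List.map_congr_left
          intro p hp
          have hp1 : p.1 ≠ k := by
            intro h
            have hmem : p.1 ∈ m.keys := PySem.Dict.mem_keys_of_mem_items m hp
            rw [PySem.Dict.contains_eq_decide_mem_keys] at hc'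
            rw [h] at hmem
            simp [hmem] at hc'
          rw [pv_getD_mk_cons, if_neg (by simp [beq_eq_false_iff_ne.mpr (fun h => hp1 h.symm)])]
        have hone : [(k, v)].map (fun p => (p.1, pvPick ((PySem.Dict.mk t).getD p.1 "") p.2))
            = [(k, v)] := by
          simp [pv_getD_mk_of_not_mem k t hk, pvPick]
        have hfilter : t.filter (fun p => !((m.insert k v).contains p.1))
            = t.filter (fun p => !(m.contains p.1)) := by
          apply List.filter_congr
          intro p hp
          have hpk : (p.1 == k) = false := by
            refine beq_eq_false_iff_ne.mpr ?_
            intro h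
            exact hk (h ▸ List.mem_map_of_mem (f := Prod.fst) hp)
          simp [PySem.Dict.contains_insert, hpk]
        rw [hmap, hone, hfilter, List.filter_cons]
        simp [hc']

-- ===== VERDICT (by name: the statement is the Claim_ definition above) =====
theorem merge_env_with_dotenv_py_spec : Claim_equal_merge_env_with_dotenv_py := by
  intro dm re _
  unfold Spec_merge_env_with_dotenv_py merge_env_with_dotenv_py merge_env_with_dotenv_py_alt
  have hnd : (((PySem.Dict.ofList re : PySem.Dict String String).items).map Prod.fst).Nodup := by
    have := PySem.Dict.nodup_keys_ofList (κ := String) (ν := String) re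
    simpa [PySem.Dict.keys] using this
  rw [pv_foldl_merge_items _ _ hnd]
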